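-- pv_equiv track=rewrite | github.com/EvelynDevelops/cargo-edi-backend | services/edi_decoder.py | unescape_edi_content
-- ===== SOURCE A (Python) =====
-- def unescape_edi_content(text: str, line: str) -> str:
--     """
--     Improved parser:
--     - Converts ?' to literal single quote (')
--     - Only final unescaped ' is treated as segment delimiter
--     - Raises error on any unescaped ' in the middle of the segment
--     """
--     text = text.strip()
--     chars = list(text)
--     result = []
--     i = 0
--     while i < len(chars):
--         # Disallow non-ASCII apostrophes (e.g., ‘ or ’)
--         if "‘" in text or "’" in text:
--             raise ValueError(f"Line contains invalid quote character ‘ or ’: {line}")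
--
--         if chars[i] == "?":
--             # Escape handler
--             if i + 1 < len(chars) and chars[i + 1] == "'":
--                 result.append("'")
--                 i += 2
--             else:
--                 result.append("?")
--                 i += 1
--         elif chars[i] == "'":
--             # Check if this is the last character
--             if i == len(chars) - 1:
--                 break  # This is the segment delimiter, exclude from result
--             else:
--                 # Error: unexpected apostrophe not escaped
--                 raise ValueError(f"Line contains unescaped apostrophe (use ?'): {line}")
--         else:
--             result.append(chars[i])
--             i += 1
--     return ''.join(result)
-- ===== SOURCE B (Python) =====
-- def unescape_edi_content(text: str, line: str) -> str:
--     """Validate-then-substitute: strip the trailing delimiter, reject any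
--     apostrophe not preceded by '?', then rewrite every ?' at once."""
--     text = text.strip()
--     if text and ("\u2018" in text or "\u2019" in text):
--         raise ValueError(f"Line contains invalid quote character \u2018 or \u2019: {line}")
--     if text.endswith("'") and not text.endswith("?'"):
--         text = text[:-1]
--     if text.startswith("'") or any(c == "'" and p != "?" for p, c in zip(text, text[1:])):
--         raise ValueError(f"Line contains unescaped apostrophe (use ?'): {line}")
--     return text.replace("?'", "'")
-- ===== Notes on version B (the rewrite author's own statement) =====
-- stated objective: simpler
-- what changed: Replaces the index/lookahead while-loop state machine with validate-then-substitute: endswith tests drop the trailing delimiter, a zip(text, text[1:]) scan rejects unescaped apostrophes, and one str.replace rewrites all ?' escapes at once; the per-character Python loop disappears into C-level built-ins.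
import Mathlib
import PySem

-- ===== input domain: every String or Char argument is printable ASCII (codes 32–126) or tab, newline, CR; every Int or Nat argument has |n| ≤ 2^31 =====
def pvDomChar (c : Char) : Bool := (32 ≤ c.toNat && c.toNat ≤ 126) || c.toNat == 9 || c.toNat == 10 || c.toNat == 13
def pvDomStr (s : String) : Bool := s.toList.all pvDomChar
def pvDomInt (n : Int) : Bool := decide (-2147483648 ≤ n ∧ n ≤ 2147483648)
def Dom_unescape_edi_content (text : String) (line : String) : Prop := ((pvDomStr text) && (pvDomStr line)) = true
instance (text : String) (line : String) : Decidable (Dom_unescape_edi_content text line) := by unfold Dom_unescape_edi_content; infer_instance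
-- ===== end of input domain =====

-- B replaces A's index/lookahead while-loop with validate-then-substitute (endswith tests,
-- a zip-based neighbour scan, one replace); objective: simpler. Equal return values on Pre_.

-- ===== PORT A =====
-- the while loop of A: i advances by 2 on an escape "?'", else by 1; '-at-end breaks,
-- '-in-the-middle raises ValueError (modelled as returning []; excluded by Pre_)
def pvLoopA : List Char → List Char
  | [] => []
  | [c] =>
    if c = '?' then ['?']            -- i+1 < len fails: lone '?'
    else if c = '\'' then []         -- i == len-1: break (delimiter)
    else [c]
  | c :: d :: t =>
    if c = '?' then
      if d = '\'' then '\'' :: pvLoopA t   -- escape: append ', i += 2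
      else '?' :: pvLoopA (d :: t)         -- lone '?', i += 1
    else if c = '\'' then []               -- ValueError: unescaped apostrophe (outside Pre_)
    else c :: pvLoopA (d :: t)

def unescape_edi_content (text : String) (line : String) : String :=
  let t := PySem.Chars.strip text.toList
  -- the curly-quote check runs inside the loop, i.e. only when t is nonempty; raise → ""
  if t.length > 0 ∧ (PySem.Chars.isIn ['‘'] t ∨ PySem.Chars.isIn ['’'] t) then ""
  else String.ofList (pvLoopA t)

-- ===== PORT B =====
def unescape_edi_content_alt (text : String) (line : String) : String :=
  let t := PySem.Str.strip text
  if PySem.Str.len t > 0 ∧ (PySem.Str.isIn "‘" t ∨ PySem.Str.isIn "’" t) then ""  -- raise ValueError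
  else
    let t2 := if PySem.Str.endswith t "'" && !PySem.Str.endswith t "?'"
              then PySem.Str.slice t none (some (-1)) else t
    if PySem.Str.startswith t2 "'"
       || ((t2.toList.zip (PySem.Str.slice t2 (some 1) none).toList).any
            fun pc => pc.2 == '\'' && pc.1 != '?')
    then ""  -- raise ValueError
    else PySem.Str.replace t2 "?'" "'"

-- ===== PRECONDITION & SPEC =====
-- Pre_ excludes exactly the inputs where A raises ValueError: a stripped text containing a
-- curly quote, or an unescaped apostrophe (one not directly preceded by '?') before the end.
def Pre_unescape_edi_content (text : String) (line : String) : Prop :=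
  let s := PySem.Chars.strip text.toList
  (s ≠ [] → '‘' ∉ s ∧ '’' ∉ s) ∧
  ∀ i < s.length, s[i]? = some '\'' → (i = s.length - 1 ∨ s[i-1]? = some '?')
instance (text : String) (line : String) : Decidable (Pre_unescape_edi_content text line) := by
  unfold Pre_unescape_edi_content; infer_instance

def pvWitness_unescape_edi_content : String × String := ("ab?'cd'", "LIN+A?'B'")

def Spec_unescape_edi_content (text : String) (line : String) (out : String) : Prop := out = unescape_edi_content_alt text line
instance (text : String) (line : String) (out : String) : Decidable (Spec_unescape_edi_content text line out) := by unfold Spec_unescape_edi_content; infer_instance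

-- ===== CLAIM (what is proved, stated in full; the proofs are below) =====
def Claim_equal_unescape_edi_content : Prop := ∀ (text : String) (line : String), Dom_unescape_edi_content text line → Pre_unescape_edi_content text line → Spec_unescape_edi_content text line (unescape_edi_content text line)

-- ===== LEMMAS AND PROOFS =====

-- the common value both programs compute on valid input: every "?'" becomes "'"
def pvRep : List Char → List Char
  | [] => []
  | [c] => [c]
  | c :: d :: t => if c = '?' ∧ d = '\'' then '\'' :: pvRep t else c :: pvRep (d :: t)

-- B's neighbour scan, at the chars level
def pvRaws (s : List Char) : Bool :=
  (s.zip (s.drop 1)).any fun pc => pc.2 == '\'' && pc.1 != '?'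

lemma pvRaws_cons (c d : Char) (t : List Char) :
    pvRaws (c :: d :: t) = ((d == '\'' && c != '?') || pvRaws (d :: t)) := by
  simp [pvRaws, List.zip]

-- str.replace via its fuelled worker equals pvRep for old = "?'" , new = "'"
lemma pvGo_eq (fuel : Nat) : ∀ (l acc : List Char), l.length ≤ fuel →
    PySem.Chars.replace.go ['?', '\''] ['\''] fuel l acc = acc.reverse ++ pvRep l := by
  induction fuel with
  | zero =>
    intro l acc h
    have hl : l = [] := List.length_eq_zero_iff.mp (Nat.le_zero.mp h)
    subst hl
    rw [PySem.Chars.replace.go]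
    simp [pvRep]
  | succ n ih =>
    intro l acc h
    match l with
    | [] => rw [PySem.Chars.replace.go]; simp [pvRep]; omega
    | [c] =>
      rw [PySem.Chars.replace.go]
      have hp : List.isPrefixOf ['?', '\''] [c] = false := by
        simp [List.isPrefixOf]
      rw [hp]
      simp only [Bool.false_eq_true, if_false]
      rw [ih [] (c :: acc) (by simp)]
      simp [pvRep]
    | c :: d :: t =>
      rw [PySem.Chars.replace.go]
      by_cases hcd : c = '?' ∧ d = '\''
      · obtain ⟨hc, hd⟩ := hcd
        subst hc; subst hd
        have hp : List.isPrefixOf ['?', '\''] ('?' :: '\'' :: t) = true := by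
          simp [List.isPrefixOf]
        rw [hp]
        simp only [if_true]
        have ht : t.length ≤ n := by simp at h; omega
        rw [show ('?' :: '\'' :: t).drop ['?', '\''].length = t from rfl]
        rw [ih t _ ht]
        simp [pvRep]
      · have hp : List.isPrefixOf ['?', '\''] (c :: d :: t) = false := by
          rcases (not_and_or.mp hcd) with h1 | h1 <;> simp [List.isPrefixOf] <;> tauto
        rw [hp]
        simp only [Bool.false_eq_true, if_false]
        have ht : (d :: t).length ≤ n := by simp at h ⊢; omega
        rw [ih (d :: t) (c :: acc) ht]
        rw [pvRep]
        simp [hcd]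

lemma pvReplace_eq (l : List Char) :
    PySem.Chars.replace l ['?', '\''] ['\''] = pvRep l := by
  rw [PySem.Chars.replace]
  simp only [List.isEmpty_iff]
  rw [if_neg (by simp)]
  simpa using pvGo_eq l.length l [] le_rfl

-- structural consequences of pvRaws = false
lemma pvRaws_cons_false {c : Char} {t : List Char} (h : pvRaws (c :: t) = false) :
    pvRaws t = false := by
  cases t with
  | nil => rfl
  | cons d t' => rw [pvRaws_cons] at h; exact (Bool.or_eq_false_iff.mp h).2

lemma pvRaws_head {c : Char} {t : List Char} (h : pvRaws (c :: t) = false) (hc : c ≠ '?') :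
    t.head? ≠ some '\'' := by
  cases t with
  | nil => simp
  | cons d t' =>
    rw [pvRaws_cons] at h
    have := (Bool.or_eq_false_iff.mp h).1
    simp only [Bool.and_eq_false_iff, beq_eq_false_iff_ne, bne_eq_false_iff_eq] at this
    rcases this with h1 | h1
    · simpa using h1
    · exact absurd h1 hc

-- A's loop on a raise-free, delimiter-free text is exactly pvRep
lemma pvLoopA_no_delim : ∀ (s : List Char), s.head? ≠ some '\'' → pvRaws s = false →
    pvLoopA s = pvRep s := by
  intro s
  induction s using pvLoopA.induct with
  | case1 => intro _ _; rfl
  | case2 => intro _ _; rfl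
  | case3 _ => intro h1 _; simp at h1
  | case4 c hc hq => intro _ _; simp [pvLoopA, pvRep, hc, hq]
  | case5 t ih =>
    intro _ h2
    have h2' : pvRaws t = false := pvRaws_cons_false (pvRaws_cons_false h2)
    have h1' : t.head? ≠ some '\'' := pvRaws_head (pvRaws_cons_false h2) (by decide)
    simp only [pvLoopA, pvRep, reduceIte, reduceCtorEq, and_self, if_true]
    rw [ih h1' h2']
  | case6 d t hd ih =>
    intro _ h2
    have h2' : pvRaws (d :: t) = false := pvRaws_cons_false h2
    simp only [pvLoopA, pvRep]
    simp only [if_true, true_and, if_neg hd]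
    rw [ih (by simpa using hd) h2']
  | case7 d t _ => intro h1 _; simp at h1
  | case8 c d t hc hq ih =>
    intro _ h2
    have h2' : pvRaws (d :: t) = false := pvRaws_cons_false h2
    have h1' : (d :: t).head? ≠ some '\'' := pvRaws_head h2 hc
    simp only [pvLoopA, pvRep]
    rw [if_neg hc, if_neg hq, if_neg (by tauto)]
    rw [ih h1' h2']

-- A's loop on (u ++ ['\'']) with a raise-free u whose last char is not '?' :
-- the final quote is the delimiter (break), and the body yields pvRep u
lemma pvLoopA_delim : ∀ (u : List Char), u.head? ≠ some '\'' → pvRaws u = false →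
    u.getLast? ≠ some '?' → pvLoopA (u ++ ['\'']) = pvRep u := by
  intro u
  induction u using pvLoopA.induct with
  | case1 => intro _ _ _; rfl
  | case2 => intro _ _ h3; simp at h3
  | case3 _ => intro h1 _ _; simp at h1
  | case4 c hc hq => intro _ _ _; simp [pvLoopA, pvRep, hc, hq]
  | case5 t ih =>
    intro _ h2 h3
    have h2' : pvRaws t = false := pvRaws_cons_false (pvRaws_cons_false h2)
    have h1' : t.head? ≠ some '\'' := pvRaws_head (pvRaws_cons_false h2) (by decide)
    have h3' : t.getLast? ≠ some '?' := by
      cases t with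
      | nil => simp
      | cons e t' => rw [List.getLast?_cons_cons, List.getLast?_cons_cons] at h3; exact h3
    simp only [List.cons_append, pvLoopA, pvRep, and_self, if_true]
    rw [ih h1' h2' h3']
  | case6 d t hd ih =>
    intro _ h2 h3
    have h2' : pvRaws (d :: t) = false := pvRaws_cons_false h2
    have h3' : (d :: t).getLast? ≠ some '?' := by
      rw [List.getLast?_cons_cons] at h3; exact h3
    simp only [List.cons_append, pvLoopA, pvRep]
    simp only [if_true, true_and, if_neg hd]
    have hih := ih (by simpa using hd) h2' h3'
    simp only [List.cons_append] at hih
    rw [hih]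
  | case7 d t _ => intro h1 _ _; simp at h1
  | case8 c d t hc hq ih =>
    intro _ h2 h3
    have h2' : pvRaws (d :: t) = false := pvRaws_cons_false h2
    have h1' : (d :: t).head? ≠ some '\'' := pvRaws_head h2 hc
    have h3' : (d :: t).getLast? ≠ some '?' := by
      rw [List.getLast?_cons_cons] at h3; exact h3
    simp only [List.cons_append, pvLoopA, pvRep]
    rw [if_neg hc, if_neg hq, if_neg (by tauto)]
    have hih := ih h1' h2' h3'
    simp only [List.cons_append] at hih
    rw [hih]

lemma pvStartswith_quote (u : List Char) :
    PySem.Chars.startswith u ['\''] = true ↔ u.head? = some '\'' := by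
  cases u with
  | nil => simp [PySem.Chars.startswith, List.isPrefixOf]
  | cons c t =>
    simp only [PySem.Chars.startswith, List.head?_cons, Option.some_inj]
    rw [List.isPrefixOf_cons₂, List.isPrefixOf_nil_left]
    rw [Bool.and_true, beq_iff_eq]
    exact eq_comm

lemma pvRaws_eq_false_of_adj : ∀ (s : List Char),
    (∀ i, i + 1 < s.length → s[i+1]? = some '\'' → s[i]? = some '?') → pvRaws s = false := by
  intro s
  induction s with
  | nil => intro _; rfl
  | cons c t ih =>
    intro h
    cases t with
    | nil => rfl
    | cons d t' =>
      rw [pvRaws_cons, Bool.or_eq_false_iff]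
      constructor
      · have h0 := h 0
        simp only [List.getElem?_cons_succ, List.getElem?_cons_zero] at h0
        by_cases hd : d = '\''
        · have := h0 (by simp) (by rw [hd])
          have hc : c = '?' := by simpa using this
          simp [hc]
        · simp [hd]
      · exact ih (fun i hi hq => by
          have := h (i+1) (by simpa using Nat.succ_lt_succ hi)
            (by simpa using hq)
          simpa using this)

-- the heart of the equivalence, at the chars level
lemma pv_main (s : List Char)
    (hP : ∀ i < s.length, s[i]? = some '\'' → (i = s.length - 1 ∨ s[i-1]? = some '?')) :
    ((PySem.Chars.startswith
        (if PySem.Chars.endswith s ['\''] && !PySem.Chars.endswith s ['?', '\''] then s.dropLast else s)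
        ['\''] ||
      pvRaws (if PySem.Chars.endswith s ['\''] && !PySem.Chars.endswith s ['?', '\''] then s.dropLast else s)) = false)
    ∧ pvLoopA s =
        pvRep (if PySem.Chars.endswith s ['\''] && !PySem.Chars.endswith s ['?', '\''] then s.dropLast else s) := by
  cases hb : (PySem.Chars.endswith s ['\''] && !PySem.Chars.endswith s ['?', '\'']) with
  | true =>
    simp only [if_true]
    obtain ⟨he, hne⟩ := Bool.and_eq_true_iff.mp hb
    have hne' : PySem.Chars.endswith s ['?', '\''] = false := by
      cases h : PySem.Chars.endswith s ['?', '\''] <;> simp [h] at hne ⊢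
    obtain ⟨u, hu⟩ := (PySem.Chars.endswith_iff s ['\'']).mp he
    have hu' : u ++ ['\''] = s := hu
    have hdl : s.dropLast = u := by rw [← hu']; exact List.dropLast_concat
    have hlen : s.length = u.length + 1 := by rw [← hu']; simp
    have hui : ∀ j, j < u.length → s[j]? = u[j]? := by
      intro j hj; rw [← hu']; exact List.getElem?_append_left hj
    have hadj : ∀ i, i + 1 < u.length → u[i+1]? = some '\'' → u[i]? = some '?' := by
      intro i hi hq
      rcases hP (i+1) (by omega) (by rw [hui (i+1) hi]; exact hq) with h1 | h1
      · omega
      · rw [← hui i (by omega)]; simpa using h1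
    have hh : u.head? ≠ some '\'' := by
      intro h0
      have hu0 : u ≠ [] := by intro h; rw [h] at h0; simp at h0
      have hulen : 0 < u.length := List.length_pos_iff.mpr hu0
      have h0' : u[0]? = some '\'' := by rw [← List.head?_eq_getElem?]; exact h0
      rcases hP 0 (by omega) (by rw [hui 0 hulen]; exact h0') with h1 | h1
      · omega
      · rw [Nat.zero_sub, hui 0 hulen, h0'] at h1; simp at h1
    have hl : u.getLast? ≠ some '?' := by
      intro hlast
      obtain ⟨v, hv⟩ := List.getLast?_eq_some_iff.mp hlast
      have : s = v ++ ['?', '\''] := by rw [← hu', hv]; simp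
      have : PySem.Chars.endswith s ['?', '\''] = true :=
        (PySem.Chars.endswith_iff s ['?', '\'']).mpr ⟨v, this.symm⟩
      rw [this] at hne'; exact absurd hne' (by simp)
    have hraws : pvRaws u = false := pvRaws_eq_false_of_adj u hadj
    refine ⟨?_, ?_⟩
    · rw [hdl, Bool.or_eq_false_iff]
      refine ⟨?_, hraws⟩
      cases hsw : PySem.Chars.startswith u ['\''] with
      | true => exact absurd ((pvStartswith_quote u).mp hsw) hh
      | false => rfl
    · rw [hdl, ← hu']; exact pvLoopA_delim u hh hraws hl
  | false =>
    simp only [Bool.false_eq_true, if_false]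
    have hbad : PySem.Chars.endswith s ['\''] = false ∨ PySem.Chars.endswith s ['?', '\''] = true := by
      rcases Bool.and_eq_false_iff.mp hb with h | h
      · left; cases hx : PySem.Chars.endswith s ['\''] <;> simp [hx] at h ⊢
      · right; cases hx : PySem.Chars.endswith s ['?', '\''] <;> simp [hx] at h ⊢
    have hadj : ∀ i, i + 1 < s.length → s[i+1]? = some '\'' → s[i]? = some '?' := by
      intro i hi hq
      rcases hP (i+1) hi hq with h1 | h1
      · -- the quote is the last char of s, so s ends with ' ; hb forces s to end with "?'"
        have hlast : s.getLast? = some '\'' := by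
          rw [List.getLast?_eq_getElem?, ← h1]; exact hq
        obtain ⟨v, hv⟩ := List.getLast?_eq_some_iff.mp hlast
        have hes : PySem.Chars.endswith s ['\''] = true :=
          (PySem.Chars.endswith_iff s ['\'']).mpr ⟨v, hv.symm⟩
        rcases hbad with h2 | h2
        · rw [hes] at h2; exact absurd h2 (by simp)
        · obtain ⟨w, hw⟩ := (PySem.Chars.endswith_iff s ['?', '\'']).mp h2
          have hw' : s = w ++ ['?', '\''] := hw.symm
          have hiw : i = w.length := by
            have : s.length = w.length + 2 := by rw [hw']; simp
            omega
          rw [hw', List.getElem?_append_right (by omega)]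
          simp [hiw]
      · simpa using h1
    have hh : s.head? ≠ some '\'' := by
      intro h0
      have hs0 : s ≠ [] := by intro h; rw [h] at h0; simp at h0
      have hslen : 0 < s.length := List.length_pos_iff.mpr hs0
      have h0' : s[0]? = some '\'' := by rw [← List.head?_eq_getElem?]; exact h0
      rcases hP 0 hslen h0' with h1 | h1
      · -- s = ['\''] : but then s ends with ' and not with "?'", contradicting hb
        have hs1 : s = ['\''] := by
          have : s.length = 1 := by omega
          match s, this with
          | [c], _ => injection h0 with h; rw [h]
        rw [hs1] at hb; simp [PySem.Chars.endswith, List.isSuffixOf] at hb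
      · rw [Nat.zero_sub, h0'] at h1; simp at h1
    have hraws : pvRaws s = false := pvRaws_eq_false_of_adj s hadj
    refine ⟨?_, pvLoopA_no_delim s hh hraws⟩
    rw [Bool.or_eq_false_iff]
    refine ⟨?_, hraws⟩
    cases hsw : PySem.Chars.startswith s ['\''] with
    | true => exact absurd ((pvStartswith_quote s).mp hsw) hh
    | false => rfl

-- ===== VERDICT (by name: the statement is the Claim_ definition above) =====
theorem unescape_edi_content_spec : Claim_equal_unescape_edi_content := by
  unfold Claim_equal_unescape_edi_content
  intro text line _hdom hpre
  unfold Spec_unescape_edi_content unescape_edi_content unescape_edi_content_alt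
  obtain ⟨hcur, hP⟩ := hpre
  set s : List Char := PySem.Chars.strip text.toList with hs
  have htl : (PySem.Str.strip text).toList = s := PySem.Str.toList_strip text
  by_cases hA : s.length > 0 ∧ (PySem.Chars.isIn ['‘'] s ∨ PySem.Chars.isIn ['’'] s)
  · exfalso
    have hne : s ≠ [] := by intro h; rw [h] at hA; simp at hA
    obtain ⟨n1, n2⟩ := hcur hne
    rcases hA.2 with h | h
    · exact n1 ((List.singleton_infix_iff '‘' s).mp ((PySem.Chars.isIn_iff_infix _ _).mp h))
    · exact n2 ((List.singleton_infix_iff '’' s).mp ((PySem.Chars.isIn_iff_infix _ _).mp h))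
  · have hB : ¬ (PySem.Str.len (PySem.Str.strip text) > 0 ∧
        (PySem.Str.isIn "‘" (PySem.Str.strip text) ∨ PySem.Str.isIn "’" (PySem.Str.strip text))) := by
      rw [PySem.Str.len_eq, PySem.Str.isIn_eq, PySem.Str.isIn_eq, htl]
      intro h
      apply hA
      refine ⟨by exact_mod_cast h.1, ?_⟩
      simpa using h.2
    rw [if_neg hA, if_neg hB]
    set T := PySem.Str.strip text with hT
    have hcond : (PySem.Str.endswith T "'" && !PySem.Str.endswith T "?'")
        = (PySem.Chars.endswith s ['\''] && !PySem.Chars.endswith s ['?', '\'']) := by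
      rw [PySem.Str.endswith_eq, PySem.Str.endswith_eq, htl]
      rfl
    set t2 : String := (if PySem.Str.endswith T "'" && !PySem.Str.endswith T "?'"
        then PySem.Str.slice T none (some (-1)) else T) with ht2
    have ht2l : t2.toList =
        (if PySem.Chars.endswith s ['\''] && !PySem.Chars.endswith s ['?', '\'']
         then s.dropLast else s) := by
      rw [ht2, hcond]
      cases hb : (PySem.Chars.endswith s ['\''] && !PySem.Chars.endswith s ['?', '\'']) with
      | true =>
        simp only [if_true]
        rw [PySem.Str.toList_slice, htl]
        simp [pysem]
      | false => simp only [Bool.false_eq_true, if_false]; exact htl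
    obtain ⟨hchk, hloop⟩ := pv_main s hP
    have hcheckS : (PySem.Str.startswith t2 "'"
        || ((t2.toList.zip (PySem.Str.slice t2 (some 1) none).toList).any
              fun pc => pc.2 == '\'' && pc.1 != '?')) = false := by
      rw [PySem.Str.startswith_eq, PySem.Str.toList_slice]
      rw [show PySem.Chars.slice t2.toList (some 1) none = t2.toList.drop 1 by simp [pysem]]
      rw [ht2l]
      simpa [pvRaws] using hchk
    have hnot : ¬ ((PySem.Str.startswith t2 "'"
        || ((t2.toList.zip (PySem.Str.slice t2 (some 1) none).toList).any
              fun pc => pc.2 == '\'' && pc.1 != '?')) = true) := by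
      rw [hcheckS]; simp
    rw [if_neg hnot]
    have hrep : (PySem.Str.replace t2 "?'" "'").toList = pvRep t2.toList := by
      rw [PySem.Str.toList_replace]
      exact pvReplace_eq t2.toList
    conv_rhs => rw [← String.ofList_toList (s := PySem.Str.replace t2 "?'" "'")]
    exact congrArg String.ofList (by rw [hrep, ht2l]; exact hloop)
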